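-- pv_equiv track=rewrite | github.com/chankxow/KU-STUDENT-Y1 | L05/11-L05.py | count_destroyed_enemies
-- ===== SOURCE A (Python) =====
-- def count_destroyed_enemies(grid, n):
--     destroyed_count = 0
--     for i in range(n):
--         for j in range(n):
--             if grid[i][j] == 'G':
--                 for di in range(-2, 3):
--                     for dj in range(-2, 3):
--                         ni, nj = i + di, j + dj
--                         if 0 <= ni < n and 0 <= nj < n and grid[ni][nj] == 'E':
--                             destroyed_count += 1
--                             grid[ni][nj] = '.'
--
--     return destroyed_count
-- ===== SOURCE B (Python) =====
-- def count_destroyed_enemies(grid, n):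
--     # Enemy-centric scan: for each enemy cell, look for a gun in its 5x5
--     # Chebyshev neighborhood; count it once and mark it destroyed.
--     # Performs the same in-place mutation as the original (E -> '.').
--     def gun_in_range(i, j):
--         return any(
--             grid[ni][nj] == 'G'
--             for ni in range(max(0, i - 2), min(n, i + 3))
--             for nj in range(max(0, j - 2), min(n, j + 3))
--         )
--
--     destroyed_count = 0
--     for i in range(n):
--         for j in range(n):
--             if grid[i][j] == 'E' and gun_in_range(i, j):
--                 destroyed_count += 1
--                 grid[i][j] = '.'
--     return destroyed_count
-- ===== Notes on version B (the rewrite author's own statement) =====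
-- stated objective: alternative
-- what changed: Inverted the scan: instead of iterating guns and destroying every enemy in each gun's 5x5 box (relying on mutation to avoid double counts), B iterates enemy cells and counts each one that has a gun anywhere in its clamped 5x5 Chebyshev neighborhood, using an any()-based helper; the return value and the in-place E->'.' mutation are identical.
import Mathlib
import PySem

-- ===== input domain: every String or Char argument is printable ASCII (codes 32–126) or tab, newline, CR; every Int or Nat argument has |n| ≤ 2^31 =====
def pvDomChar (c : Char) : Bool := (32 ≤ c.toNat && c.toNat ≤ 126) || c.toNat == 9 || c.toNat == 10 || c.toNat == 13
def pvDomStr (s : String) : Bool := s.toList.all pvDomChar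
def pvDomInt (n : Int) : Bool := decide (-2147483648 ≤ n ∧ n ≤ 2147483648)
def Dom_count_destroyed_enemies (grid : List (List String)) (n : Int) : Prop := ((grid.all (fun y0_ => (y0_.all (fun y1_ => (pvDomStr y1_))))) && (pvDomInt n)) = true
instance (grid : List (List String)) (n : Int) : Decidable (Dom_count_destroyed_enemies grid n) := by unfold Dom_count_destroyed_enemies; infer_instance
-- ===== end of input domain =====

-- B inverts the scan (enemy-centric with an any()-based neighborhood test instead of gun-centric
-- destruction); equivalence proved here is about the return value (both Pythons perform the identical
-- in-place E -> '.' mutation).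

-- ===== PORT A =====
-- grid[x][y] (every use site has provably nonnegative in-range indices under Pre_)
def pvCellGet (g : List (List String)) (x y : Int) : String :=
  PySem.List.pyGetD (PySem.List.pyGetD g x []) y ""

-- grid[x][y] = v
def pvCellSet (g : List (List String)) (x y : Int) (v : String) : List (List String) :=
  PySem.List.pySetD g x (PySem.List.pySetD (PySem.List.pyGetD g x []) y v)

def count_destroyed_enemies (grid : List (List String)) (n : Int) : Int :=
  ((PySem.List.pyRange 0 n).foldl (fun (st : List (List String) × Int) i =>
    (PySem.List.pyRange 0 n).foldl (fun st j =>
      if pvCellGet st.1 i j = "G" then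
        (PySem.List.pyRange (-2) 3).foldl (fun st di =>
          (PySem.List.pyRange (-2) 3).foldl (fun st dj =>
            if 0 ≤ i + di ∧ i + di < n ∧ 0 ≤ j + dj ∧ j + dj < n ∧
                pvCellGet st.1 (i + di) (j + dj) = "E" then
              (pvCellSet st.1 (i + di) (j + dj) ".", st.2 + 1)
            else st) st) st
      else st) st) (grid, 0)).2

-- ===== PORT B =====
def pvGunInRange (g : List (List String)) (n i j : Int) : Bool :=
  (PySem.List.pyRange (max 0 (i - 2)) (min n (i + 3))).any (fun ni =>
    (PySem.List.pyRange (max 0 (j - 2)) (min n (j + 3))).any (fun nj =>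
      pvCellGet g ni nj == "G"))

def count_destroyed_enemies_alt (grid : List (List String)) (n : Int) : Int :=
  ((PySem.List.pyRange 0 n).foldl (fun (st : List (List String) × Int) i =>
    (PySem.List.pyRange 0 n).foldl (fun st j =>
      if pvCellGet st.1 i j = "E" ∧ pvGunInRange st.1 n i j then
        (pvCellSet st.1 i j ".", st.2 + 1)
      else st) st) (grid, 0)).2

-- ===== PRECONDITION & SPEC =====
-- Pre_ excludes exactly the inputs on which the Python raises IndexError: n exceeding the number of
-- rows, or one of the first n rows shorter than n.
def Pre_count_destroyed_enemies (grid : List (List String)) (n : Int) : Prop :=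
  n ≤ (grid.length : Int) ∧ ∀ row ∈ grid.take n.toNat, n ≤ (row.length : Int)

instance (grid : List (List String)) (n : Int) : Decidable (Pre_count_destroyed_enemies grid n) := by
  unfold Pre_count_destroyed_enemies; infer_instance

def pvWitness_count_destroyed_enemies : List (List String) × Int :=
  ([["G", "E"], [".", "E"]], 2)

def Spec_count_destroyed_enemies (grid : List (List String)) (n : Int) (out : Int) : Prop := out = count_destroyed_enemies_alt grid n
instance (grid : List (List String)) (n : Int) (out : Int) : Decidable (Spec_count_destroyed_enemies grid n out) := by unfold Spec_count_destroyed_enemies; infer_instance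

-- ===== CLAIM (what is proved, stated in full; the proofs are below) =====
def Claim_equal_count_destroyed_enemies : Prop := ∀ (grid : List (List String)) (n : Int), Dom_count_destroyed_enemies grid n → Pre_count_destroyed_enemies grid n → Spec_count_destroyed_enemies grid n (count_destroyed_enemies grid n)

-- ===== LEMMAS AND PROOFS =====

-- in-bounds test for a cell of the n×n board
def pvInb (n x y : Int) : Bool := decide (0 ≤ x ∧ x < n ∧ 0 ≤ y ∧ y < n)

-- Chebyshev distance ≤ 2
def pvNear (u v x y : Int) : Bool :=
  decide (-2 ≤ x - u ∧ x - u ≤ 2 ∧ -2 ≤ y - v ∧ y - v ≤ 2)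

-- all board positions in row-major order
def pvAllPos (n : Int) : List (Int × Int) :=
  (PySem.List.pyRange 0 n) ×ˢ (PySem.List.pyRange 0 n)

-- the 5×5 offset box in row-major order
def pvOffs : List (Int × Int) := (PySem.List.pyRange (-2) 3) ×ˢ (PySem.List.pyRange (-2) 3)

-- "p is an original enemy destroyed by some gun position in L" (w.r.t. the ORIGINAL grid g0)
def pvDest (g0 : List (List String)) (L : List (Int × Int)) (p : Int × Int) : Bool :=
  pvCellGet g0 p.1 p.2 == "E" &&
    L.any (fun q => pvCellGet g0 q.1 q.2 == "G" && pvNear q.1 q.2 p.1 p.2)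

-- same row/column lengths
def pvShape (g0 g : List (List String)) : Prop :=
  g.length = g0.length ∧ ∀ k : Nat, (g.getD k []).length = (g0.getD k []).length

-- the loop invariant shared by both ports: P describes the set of already-destroyed cells
def pvInv (g0 : List (List String)) (n : Int) (P : Int × Int → Bool)
    (st : List (List String) × Int) : Prop :=
  pvShape g0 st.1 ∧
  (∀ x y : Int, 0 ≤ x → 0 ≤ y →
      pvCellGet st.1 x y = if pvInb n x y && P (x, y) then "." else pvCellGet g0 x y) ∧
  st.2 = ((pvAllPos n).countP P : Int)

-- flattened loop bodies of the two ports
def pvStepOff (n : Int) (q : Int × Int) (st : List (List String) × Int) (o : Int × Int) :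
    List (List String) × Int :=
  if 0 ≤ q.1 + o.1 ∧ q.1 + o.1 < n ∧ 0 ≤ q.2 + o.2 ∧ q.2 + o.2 < n ∧
      pvCellGet st.1 (q.1 + o.1) (q.2 + o.2) = "E" then
    (pvCellSet st.1 (q.1 + o.1) (q.2 + o.2) ".", st.2 + 1)
  else st

def pvStepA (n : Int) (st : List (List String) × Int) (p : Int × Int) :
    List (List String) × Int :=
  if pvCellGet st.1 p.1 p.2 = "G" then pvOffs.foldl (pvStepOff n p) st else st

def pvStepB (n : Int) (st : List (List String) × Int) (p : Int × Int) :
    List (List String) × Int :=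
  if pvCellGet st.1 p.1 p.2 = "E" ∧ pvGunInRange st.1 n p.1 p.2 then
    (pvCellSet st.1 p.1 p.2 ".", st.2 + 1)
  else st

-- the predicate tracked during A's inner (offset) loop at gun q
def pvDestOff (g0 : List (List String)) (L : List (Int × Int)) (q : Int × Int)
    (O : List (Int × Int)) (p : Int × Int) : Bool :=
  pvDest g0 L p ||
    (pvCellGet g0 p.1 p.2 == "E" && O.any (fun o => p.1 == q.1 + o.1 && p.2 == q.2 + o.2))

-- the predicate tracked during B's loop
def pvDestB (g0 : List (List String)) (n : Int) (L : List (Int × Int)) (p : Int × Int) : Bool :=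
  decide (p ∈ L) && pvDest g0 (pvAllPos n) p

-- ---- generic list lemmas ----

theorem pv_foldl_foldl_prod {α β γ : Type} (l1 : List α) (l2 : List β)
    (f : γ → α → β → γ) (s : γ) :
    l1.foldl (fun s a => l2.foldl (fun s b => f s a b) s) s =
      (l1 ×ˢ l2).foldl (fun s p => f s p.1 p.2) s := by
  induction l1 generalizing s with
  | nil => rfl
  | cons a l1 ih =>
    simp only [List.foldl_cons, ih, List.product_cons, List.foldl_append, List.foldl_map]

theorem pv_countP_flip {α : Type} [DecidableEq α] (l : List α) (p q : α → Bool) (x : α)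
    (hnd : l.Nodup) (hx : x ∈ l) (hpx : p x = false) (hqx : q x = true)
    (hagree : ∀ y ∈ l, y ≠ x → p y = q y) :
    l.countP q = l.countP p + 1 := by
  induction l with
  | nil => cases hx
  | cons a l ih =>
    rcases List.nodup_cons.mp hnd with ⟨hax, hnd'⟩
    rcases List.mem_cons.mp hx with rfl | hx'
    · have hrest : l.countP q = l.countP p := by
        apply List.countP_congr
        intro y hy
        rw [hagree y (List.mem_cons_of_mem _ hy) (fun h => hax (h ▸ hy))]
      simp [hpx, hqx, hrest]
    · have hax' : a ≠ x := fun h => hax (h ▸ hx')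
      have := ih hnd' hx' (fun y hy hyx => hagree y (List.mem_cons_of_mem _ hy) hyx)
      rw [List.countP_cons, List.countP_cons, this, hagree a (List.mem_cons_self) hax']
      omega

-- ---- board position lemmas ----

theorem pv_mem_allPos {n : Int} {p : Int × Int} :
    p ∈ pvAllPos n ↔ (0 ≤ p.1 ∧ p.1 < n ∧ 0 ≤ p.2 ∧ p.2 < n) := by
  obtain ⟨a, b⟩ := p
  simp [pvAllPos, List.mem_product, PySem.List.mem_pyRange_one]
  tauto

theorem pv_nodup_allPos (n : Int) : (pvAllPos n).Nodup :=
  List.Nodup.product (PySem.List.nodup_pyRange_one 0 n) (PySem.List.nodup_pyRange_one 0 n)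

theorem pv_mem_offs {o : Int × Int} :
    o ∈ pvOffs ↔ (-2 ≤ o.1 ∧ o.1 < 3 ∧ -2 ≤ o.2 ∧ o.2 < 3) := by
  obtain ⟨a, b⟩ := o
  simp [pvOffs, List.mem_product, PySem.List.mem_pyRange_one]
  tauto

-- ---- cell get/set lemmas ----

theorem pv_getD_set_self {α : Type} (l : List α) (i : Nat) (a d : α) (h : i < l.length) :
    (l.set i a).getD i d = a := by
  rw [List.getD_eq_getElem?_getD, List.getElem?_set_self (by simpa using h), Option.getD_some]

theorem pv_getD_set_ne {α : Type} (l : List α) {i j : Nat} (a d : α) (h : i ≠ j) :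
    (l.set i a).getD j d = l.getD j d := by
  rw [List.getD_eq_getElem?_getD, List.getElem?_set_ne h, ← List.getD_eq_getElem?_getD]

theorem pv_cellGet_set (g : List (List String)) {x y : Int} (v : String) {x' y' : Int}
    (hx : 0 ≤ x) (hy : 0 ≤ y) (hx' : 0 ≤ x') (hy' : 0 ≤ y')
    (hxl : x.toNat < g.length) (hyl : y.toNat < (g.getD x.toNat []).length) :
    pvCellGet (pvCellSet g x y v) x' y' =
      if x' = x ∧ y' = y then v else pvCellGet g x' y' := by
  unfold pvCellGet pvCellSet
  rw [PySem.List.pySetD_of_nonneg _ _ hx, PySem.List.pyGetD_of_nonneg _ _ hx,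
      PySem.List.pySetD_of_nonneg _ _ hy, PySem.List.pyGetD_of_nonneg _ _ hx',
      PySem.List.pyGetD_of_nonneg _ _ hy',
      PySem.List.pyGetD_of_nonneg _ _ hx', PySem.List.pyGetD_of_nonneg _ _ hy']
  by_cases hxx : x'.toNat = x.toNat
  · have hxx' : x' = x := by omega
    rw [hxx, pv_getD_set_self _ _ _ _ hxl]
    by_cases hyy : y'.toNat = y.toNat
    · have hyy' : y' = y := by omega
      rw [hyy, List.getD_eq_getElem?_getD, List.getElem?_set_self (by simpa using hyl),
          Option.getD_some, if_pos ⟨hxx', hyy'⟩]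
    · have hne : ¬(x' = x ∧ y' = y) := fun h => hyy (by rw [h.2])
      rw [if_neg hne, pv_getD_set_ne _ _ _ (fun h => hyy h.symm)]
  · have hne : ¬(x' = x ∧ y' = y) := fun h => hxx (by rw [h.1])
    rw [if_neg hne, pv_getD_set_ne _ _ _ (fun h => hxx h.symm)]

theorem pv_shape_set (g0 g : List (List String)) {x y : Int} (v : String)
    (hx : 0 ≤ x) (hy : 0 ≤ y) (hs : pvShape g0 g) : pvShape g0 (pvCellSet g x y v) := by
  obtain ⟨h1, h2⟩ := hs
  unfold pvCellSet
  rw [PySem.List.pySetD_of_nonneg _ _ hx, PySem.List.pySetD_of_nonneg _ _ hy,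
      PySem.List.pyGetD_of_nonneg _ _ hx]
  refine ⟨by simpa using h1, fun k => ?_⟩
  by_cases hk : x.toNat = k
  · subst hk
    by_cases hlt : x.toNat < g.length
    · rw [pv_getD_set_self _ _ _ _ hlt, List.length_set]
      exact h2 _
    · rw [List.set_eq_of_length_le (by omega)]
      exact h2 _
  · rw [pv_getD_set_ne _ _ _ hk]
    exact h2 k

-- under Pre_, an in-bounds position has in-range indices in any same-shape grid
theorem pv_bounds (g0 g : List (List String)) (n : Int) {x y : Int}
    (hpre : Pre_count_destroyed_enemies g0 n) (hs : pvShape g0 g)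
    (h : 0 ≤ x ∧ x < n ∧ 0 ≤ y ∧ y < n) :
    x.toNat < g.length ∧ y.toNat < (g.getD x.toNat []).length := by
  obtain ⟨hlen, hrow⟩ := hpre
  obtain ⟨h1, h2⟩ := hs
  have hxg0 : x.toNat < g0.length := by omega
  have hmem : g0.getD x.toNat [] ∈ g0.take n.toNat := by
    have hx : x.toNat < n.toNat := by omega
    have : (g0.take n.toNat)[x.toNat]'(by simp; omega) = g0[x.toNat]'hxg0 :=
      List.getElem_take
    rw [List.getD_eq_getElem?_getD, List.getElem?_eq_getElem hxg0, Option.getD_some, ← this]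
    exact List.getElem_mem _
  have := hrow _ hmem
  rw [h2]
  omega

-- ---- invariant step lemmas ----

-- a no-op step: the tracked predicate only changes outside the board
theorem pv_inv_congr (g0 : List (List String)) (n : Int) (P P' : Int × Int → Bool)
    (st : List (List String) × Int)
    (hinv : pvInv g0 n P st)
    (hagree : ∀ q : Int × Int, pvInb n q.1 q.2 = true → P' q = P q) :
    pvInv g0 n P' st := by
  obtain ⟨hs, hcells, hcnt⟩ := hinv
  refine ⟨hs, ?_, ?_⟩
  · intro x y hx hy
    rw [hcells x y hx hy]
    by_cases hin : pvInb n x y = true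
    · rw [hagree (x, y) hin]
    · simp [Bool.eq_false_iff.mpr hin]
  · rw [hcnt]
    congr 1
    apply List.countP_congr
    intro q hq
    have hin : pvInb n q.1 q.2 = true := by
      simp only [pvInb, decide_eq_true_eq]
      exact pv_mem_allPos.mp hq
    rw [hagree q hin]

-- destroying one in-bounds enemy cell
theorem pv_inv_destroy (g0 : List (List String)) (n : Int) (P P' : Int × Int → Bool)
    (st : List (List String) × Int) (p : Int × Int)
    (hpre : Pre_count_destroyed_enemies g0 n)
    (hinv : pvInv g0 n P st)
    (hp : 0 ≤ p.1 ∧ p.1 < n ∧ 0 ≤ p.2 ∧ p.2 < n)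
    (hcell : pvCellGet st.1 p.1 p.2 = "E")
    (hP'p : P' p = true)
    (hagree : ∀ q, q ≠ p → P' q = P q) :
    pvInv g0 n P' (pvCellSet st.1 p.1 p.2 ".", st.2 + 1) := by
  obtain ⟨hs, hcells, hcnt⟩ := hinv
  have hbounds := pv_bounds g0 st.1 n hpre hs hp
  have hinb : pvInb n p.1 p.2 = true := by
    simp only [pvInb, decide_eq_true_eq]; exact hp
  have hc := hcells p.1 p.2 hp.1 hp.2.2.1
  rw [hcell] at hc
  have hPp : P p = false := by
    by_cases hb : P p = true
    · rw [hinb, hb] at hc; simp at hc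
    · exact Bool.eq_false_iff.mpr hb
  refine ⟨pv_shape_set g0 st.1 "." hp.1 hp.2.2.1 ⟨hs.1, hs.2⟩, ?_, ?_⟩
  · intro x y hx hy
    rw [pv_cellGet_set st.1 "." hp.1 hp.2.2.1 hx hy hbounds.1 hbounds.2]
    by_cases hxy : x = p.1 ∧ y = p.2
    · obtain ⟨hx1, hy1⟩ := hxy
      subst hx1; subst hy1
      simp [hinb, hP'p]
    · have hne : (x, y) ≠ p := by
        intro h; exact hxy ⟨congrArg Prod.fst h, congrArg Prod.snd h⟩
      rw [if_neg hxy, hcells x y hx hy, hagree (x, y) hne]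
  · have hflip := pv_countP_flip (pvAllPos n) P P' p (pv_nodup_allPos n)
      (pv_mem_allPos.mpr hp) hPp hP'p (fun q _ hq => (hagree q hq).symm)
    simp only [hflip, hcnt]
    push_cast
    ring

-- a cell that still reads "E" is an original enemy not yet marked destroyed
theorem pv_cell_E_iff (g0 : List (List String)) (n : Int) (P : Int × Int → Bool)
    (st : List (List String) × Int) (hinv : pvInv g0 n P st) {p : Int × Int}
    (hp1 : 0 ≤ p.1) (hp2 : 0 ≤ p.2) (hcell : pvCellGet st.1 p.1 p.2 = "E") :
    pvCellGet g0 p.1 p.2 = "E" ∧ (pvInb n p.1 p.2 = true → P p = false) := by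
  have hc := hinv.2.1 p.1 p.2 hp1 hp2
  rw [hcell] at hc
  by_cases hb : (pvInb n p.1 p.2 && P (p.1, p.2)) = true
  · rw [if_pos hb] at hc; simp at hc
  · rw [if_neg hb] at hc
    refine ⟨hc.symm, fun hin => ?_⟩
    rcases Bool.and_eq_false_iff.mp (Bool.eq_false_iff.mpr hb) with h | h
    · rw [hin] at h; cases h
    · simpa using h

-- ---- A's inner (offset) loop ----

theorem pv_inner_step (g0 : List (List String)) (n : Int) (L : List (Int × Int))
    (q : Int × Int) (hpre : Pre_count_destroyed_enemies g0 n)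
    (O : List (Int × Int)) (o : Int × Int) (st : List (List String) × Int)
    (hinv : pvInv g0 n (pvDestOff g0 L q O) st) :
    pvInv g0 n (pvDestOff g0 L q (O ++ [o])) (pvStepOff n q st o) := by
  unfold pvStepOff
  split_ifs with hg
  · obtain ⟨h1, h2, h3, h4, hcell⟩ := hg
    have hg0E := pv_cell_E_iff g0 n (pvDestOff g0 L q O) st hinv
      (p := (q.1 + o.1, q.2 + o.2)) h1 h3 hcell
    apply pv_inv_destroy g0 n _ _ st (q.1 + o.1, q.2 + o.2) hpre hinv ⟨h1, h2, h3, h4⟩ hcell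
    · simp [pvDestOff, hg0E.1]
    · intro r hr
      have hro : (r.1 == q.1 + o.1 && r.2 == q.2 + o.2) = false := by
        simp only [Bool.and_eq_false_iff, beq_eq_false_iff_ne, ne_eq]
        by_cases h : r.1 = q.1 + o.1
        · right; intro h2'; exact hr (Prod.ext h h2')
        · left; exact h
      simp [pvDestOff, List.any_append, hro]
  · apply pv_inv_congr g0 n _ _ st hinv
    intro r hinbr
    by_cases hrp : r = (q.1 + o.1, q.2 + o.2)
    · subst hrp
      simp only [pvInb, decide_eq_true_eq] at hinbr
      have hcellne : pvCellGet st.1 (q.1 + o.1) (q.2 + o.2) ≠ "E" := by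
        intro h; exact hg ⟨hinbr.1, hinbr.2.1, hinbr.2.2.1, hinbr.2.2.2, h⟩
      have hc := hinv.2.1 (q.1 + o.1) (q.2 + o.2) hinbr.1 hinbr.2.2.1
      by_cases hd : pvDestOff g0 L q O (q.1 + o.1, q.2 + o.2) = true
      · have : pvDestOff g0 L q (O ++ [o]) (q.1 + o.1, q.2 + o.2) = true := by
          simp only [pvDestOff, List.any_append, Bool.or_eq_true] at hd ⊢
          rcases hd with h | h
          · exact Or.inl h
          · right; rw [Bool.and_eq_true] at h; rw [h.1]; simp [h.2]
        rw [this, hd]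
      · have hinbB : pvInb n (q.1 + o.1) (q.2 + o.2) = true := by
          simp only [pvInb, decide_eq_true_eq]; exact hinbr
        rw [hinbB, Bool.eq_false_iff.mpr hd] at hc
        simp only [Bool.and_false, if_neg (by simp : ¬(false = true))] at hc
        have hg0ne : (pvCellGet g0 (q.1 + o.1) (q.2 + o.2) == "E") = false := by
          rw [← hc]; exact beq_eq_false_iff_ne.mpr hcellne
        simp only [pvDestOff] at *
        simp [hg0ne, pvDest] at hd ⊢
    · have : (r.1 == q.1 + o.1 && r.2 == q.2 + o.2) = false := by
        simp only [Bool.and_eq_false_iff, beq_eq_false_iff_ne, ne_eq]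
        by_cases h : r.1 = q.1 + o.1
        · right; intro h2'; exact hrp (Prod.ext h h2')
        · left; exact h
      simp [pvDestOff, List.any_append, this]

theorem pv_inner_loop (g0 : List (List String)) (n : Int) (L : List (Int × Int))
    (q : Int × Int) (hpre : Pre_count_destroyed_enemies g0 n) :
    ∀ (R O : List (Int × Int)) (st : List (List String) × Int),
      pvInv g0 n (pvDestOff g0 L q O) st →
      pvInv g0 n (pvDestOff g0 L q (O ++ R)) (R.foldl (pvStepOff n q) st) := by
  intro R
  induction R with
  | nil => intro O st h; simpa using h
  | cons o R ih =>
    intro O st h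
    have := ih (O ++ [o]) (pvStepOff n q st o) (pv_inner_step g0 n L q hpre O o st h)
    simpa [List.append_assoc] using this

-- at a gun, the offset box covers exactly the near positions
theorem pv_destOff_full (g0 : List (List String)) (L : List (Int × Int)) (q : Int × Int)
    (hGun : pvCellGet g0 q.1 q.2 = "G") (p : Int × Int) :
    pvDestOff g0 L q pvOffs p = pvDest g0 (L ++ [q]) p := by
  have hany : pvOffs.any (fun o => p.1 == q.1 + o.1 && p.2 == q.2 + o.2) =
      pvNear q.1 q.2 p.1 p.2 := by
    by_cases hn : (-2 ≤ p.1 - q.1 ∧ p.1 - q.1 ≤ 2 ∧ -2 ≤ p.2 - q.2 ∧ p.2 - q.2 ≤ 2)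
    · rw [List.any_eq_true.mpr ⟨(p.1 - q.1, p.2 - q.2), pv_mem_offs.mpr (by omega),
        by simp only [beq_iff_eq, Bool.and_eq_true]; omega⟩]
      simp [pvNear, hn]
    · have : pvNear q.1 q.2 p.1 p.2 = false := by simp only [pvNear, decide_eq_false hn]
      rw [this]
      rw [List.any_eq_false]
      intro o ho
      rw [pv_mem_offs] at ho
      simp only [beq_iff_eq, Bool.and_eq_true, not_and]
      intro h1 h2
      exact hn (by omega)
  simp [pvDestOff, pvDest, List.any_append, hany, hGun, Bool.and_or_distrib_left]

-- ---- A's outer loop ----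

theorem pv_outer_loop_A (g0 : List (List String)) (n : Int)
    (hpre : Pre_count_destroyed_enemies g0 n) :
    ∀ (R L : List (Int × Int)) (st : List (List String) × Int),
      (∀ p ∈ R, 0 ≤ p.1 ∧ 0 ≤ p.2) →
      pvInv g0 n (pvDest g0 L) st →
      pvInv g0 n (pvDest g0 (L ++ R)) (R.foldl (pvStepA n) st) := by
  intro R
  induction R with
  | nil => intro L st _ h; simpa using h
  | cons p R ih =>
    intro L st hnn h
    obtain ⟨hp1, hp2⟩ := hnn p List.mem_cons_self
    have hstep : pvInv g0 n (pvDest g0 (L ++ [p])) (pvStepA n st p) := by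
      unfold pvStepA
      split_ifs with hg
      · have h0 : pvInv g0 n (pvDestOff g0 L p []) st := by
          apply pv_inv_congr _ _ _ _ _ h
          intro r _
          simp [pvDestOff]
        have hGun0 : pvCellGet g0 p.1 p.2 = "G" := by
          have hc := h.2.1 p.1 p.2 hp1 hp2
          rw [hg] at hc
          by_cases hb : (pvInb n p.1 p.2 && pvDest g0 L (p.1, p.2)) = true
          · rw [if_pos hb] at hc; simp at hc
          · rw [if_neg hb] at hc; exact hc.symm
        have hloop := pv_inner_loop g0 n L p hpre pvOffs [] st h0
        have heq : pvDestOff g0 L p ([] ++ pvOffs) = pvDest g0 (L ++ [p]) :=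
          funext (fun r => by rw [List.nil_append]; exact pv_destOff_full g0 L p hGun0 r)
        rwa [heq] at hloop
      · have hcg0 : (pvCellGet g0 p.1 p.2 == "G") = false := by
          rw [beq_eq_false_iff_ne]
          intro hG
          have hc := h.2.1 p.1 p.2 hp1 hp2
          have hPf : pvDest g0 L (p.1, p.2) = false := by
            simp [pvDest, hG]
          rw [hPf, Bool.and_false, if_neg (by simp)] at hc
          exact hg (by rw [hc, hG])
        apply pv_inv_congr _ _ _ _ _ h
        intro r _
        simp [pvDest, List.any_append, hcg0]
    have := ih (L ++ [p]) _ (fun r hr => hnn r (List.mem_cons_of_mem _ hr)) hstep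
    simpa using this

-- ---- B's loop ----

-- gun cells are never overwritten, so reading "G" sees the original grid
theorem pv_cell_G_iff (g0 : List (List String)) (n : Int) (P : Int × Int → Bool)
    (st : List (List String) × Int) (hinv : pvInv g0 n P st)
    (hPE : ∀ r, P r = true → pvCellGet g0 r.1 r.2 = "E")
    {x y : Int} (hx : 0 ≤ x) (hy : 0 ≤ y) :
    (pvCellGet st.1 x y == "G") = (pvCellGet g0 x y == "G") := by
  have hc := hinv.2.1 x y hx hy
  by_cases hb : (pvInb n x y && P (x, y)) = true
  · rw [if_pos hb] at hc
    have hE := hPE (x, y) (by simpa using hb : pvInb n x y = true ∧ P (x, y) = true).2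
    rw [hc, hE]
    rfl
  · rw [if_neg hb] at hc
    rw [hc]

-- B's clamped neighborhood scan finds exactly the in-board guns within distance 2
theorem pv_gunInRange_eq (g0 : List (List String)) (n : Int) (P : Int × Int → Bool)
    (st : List (List String) × Int) (hinv : pvInv g0 n P st)
    (hPE : ∀ r, P r = true → pvCellGet g0 r.1 r.2 = "E") (i j : Int) :
    pvGunInRange st.1 n i j =
      (pvAllPos n).any (fun q => pvCellGet g0 q.1 q.2 == "G" && pvNear q.1 q.2 i j) := by
  rw [Bool.eq_iff_iff]
  simp only [pvGunInRange, List.any_eq_true, PySem.List.mem_pyRange_one, Bool.and_eq_true]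
  constructor
  · rintro ⟨u, hu, v, hv, hG⟩
    have hu0 : 0 ≤ u := le_trans (le_max_left 0 (i - 2)) hu.1
    have hv0 : 0 ≤ v := le_trans (le_max_left 0 (j - 2)) hv.1
    rw [pv_cell_G_iff g0 n P st hinv hPE hu0 hv0] at hG
    refine ⟨(u, v), pv_mem_allPos.mpr ⟨hu0, ?_, hv0, ?_⟩, hG, ?_⟩
    · exact lt_of_lt_of_le hu.2 (min_le_left _ _)
    · exact lt_of_lt_of_le hv.2 (min_le_left _ _)
    · simp only [pvNear, decide_eq_true_eq]
      have h1 := le_trans (le_max_right 0 (i - 2)) hu.1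
      have h2 := lt_of_lt_of_le hu.2 (min_le_right _ _)
      have h3 := le_trans (le_max_right 0 (j - 2)) hv.1
      have h4 := lt_of_lt_of_le hv.2 (min_le_right _ _)
      omega
  · rintro ⟨q, hq, hG, hnear⟩
    rw [pv_mem_allPos] at hq
    simp only [pvNear, decide_eq_true_eq] at hnear
    refine ⟨q.1, ⟨?_, ?_⟩, q.2, ⟨?_, ?_⟩, ?_⟩
    · omega
    · omega
    · omega
    · omega
    · rw [pv_cell_G_iff g0 n P st hinv hPE (by omega) (by omega)]
      exact hG

theorem pv_outer_loop_B (g0 : List (List String)) (n : Int)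
    (hpre : Pre_count_destroyed_enemies g0 n) :
    ∀ (R L : List (Int × Int)) (st : List (List String) × Int),
      L ++ R = pvAllPos n →
      pvInv g0 n (pvDestB g0 n L) st →
      pvInv g0 n (pvDestB g0 n (L ++ R)) (R.foldl (pvStepB n) st) := by
  intro R
  induction R with
  | nil => intro L st _ h; simpa using h
  | cons p R ih =>
    intro L st hsplit h
    have hpmem : p ∈ pvAllPos n := by
      rw [← hsplit]; exact List.mem_append.mpr (Or.inr List.mem_cons_self)
    have hp := pv_mem_allPos.mp hpmem
    have hpnotL : p ∉ L := by
      have hnd := pv_nodup_allPos n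
      rw [← hsplit] at hnd
      exact fun hmem => (List.disjoint_of_nodup_append hnd) hmem List.mem_cons_self
    have hPE : ∀ r, pvDestB g0 n L r = true → pvCellGet g0 r.1 r.2 = "E" := by
      intro r hr
      simp only [pvDestB, pvDest, Bool.and_eq_true, beq_iff_eq] at hr
      exact hr.2.1
    have hstep : pvInv g0 n (pvDestB g0 n (L ++ [p])) (pvStepB n st p) := by
      unfold pvStepB
      split_ifs with hg
      · obtain ⟨hcell, hgun⟩ := hg
        have hg0E := (pv_cell_E_iff g0 n _ st h hp.1 hp.2.2.1 hcell).1
        rw [pv_gunInRange_eq g0 n _ st h hPE p.1 p.2] at hgun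
        apply pv_inv_destroy g0 n _ _ st p hpre h ⟨hp.1, hp.2.1, hp.2.2.1, hp.2.2.2⟩ hcell
        · simp [pvDestB, pvDest, hg0E, hgun]
        · intro r hrp
          simp [pvDestB, List.mem_append, hrp]
      · apply pv_inv_congr _ _ _ _ _ h
        intro r _
        by_cases hrp : r = p
        · subst hrp
          have hdf : pvDest g0 (pvAllPos n) r = false := by
            by_cases hE : pvCellGet st.1 r.1 r.2 = "E"
            · have hgf : pvGunInRange st.1 n r.1 r.2 = false :=
                Bool.eq_false_iff.mpr (fun hgr => hg ⟨hE, hgr⟩)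
              rw [pv_gunInRange_eq g0 n _ st h hPE r.1 r.2] at hgf
              simp [pvDest, hgf]
            · have hPf : pvDestB g0 n L r = false := by
                simp [pvDestB, hpnotL]
              have hc := h.2.1 r.1 r.2 hp.1 hp.2.2.1
              rw [hPf, Bool.and_false, if_neg (by simp)] at hc
              rw [hc] at hE
              simp [pvDest, beq_eq_false_iff_ne.mpr hE]
          simp [pvDestB, hdf]
        · simp [pvDestB, List.mem_append, hrp]
    have := ih (L ++ [p]) _ (by simpa using hsplit) hstep
    simpa using this

-- ---- flattening the ports ----

theorem pv_A_flat (grid : List (List String)) (n : Int) :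
    count_destroyed_enemies grid n = ((pvAllPos n).foldl (pvStepA n) (grid, 0)).2 := by
  unfold count_destroyed_enemies
  have hinner : ∀ (i j : Int) (st : List (List String) × Int),
      (PySem.List.pyRange (-2) 3).foldl (fun st di =>
        (PySem.List.pyRange (-2) 3).foldl (fun st dj =>
          if 0 ≤ i + di ∧ i + di < n ∧ 0 ≤ j + dj ∧ j + dj < n ∧
              pvCellGet st.1 (i + di) (j + dj) = "E" then
            (pvCellSet st.1 (i + di) (j + dj) ".", st.2 + 1)
          else st) st) st
      = pvOffs.foldl (pvStepOff n (i, j)) st := by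
    intro i j st
    exact pv_foldl_foldl_prod _ _ (fun st di dj =>
      if 0 ≤ i + di ∧ i + di < n ∧ 0 ≤ j + dj ∧ j + dj < n ∧
          pvCellGet st.1 (i + di) (j + dj) = "E" then
        (pvCellSet st.1 (i + di) (j + dj) ".", st.2 + 1)
      else st) st
  simp only [hinner]
  exact congrArg Prod.snd
    (pv_foldl_foldl_prod (PySem.List.pyRange 0 n) (PySem.List.pyRange 0 n)
      (fun st i j => pvStepA n st (i, j)) (grid, 0))

theorem pv_B_flat (grid : List (List String)) (n : Int) :
    count_destroyed_enemies_alt grid n = ((pvAllPos n).foldl (pvStepB n) (grid, 0)).2 := by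
  unfold count_destroyed_enemies_alt
  exact congrArg Prod.snd
    (pv_foldl_foldl_prod (PySem.List.pyRange 0 n) (PySem.List.pyRange 0 n)
      (fun st i j => pvStepB n st (i, j)) (grid, 0))

-- ---- initial invariants and final counts ----

theorem pv_inv_init_A (g0 : List (List String)) (n : Int) :
    pvInv g0 n (pvDest g0 []) (g0, 0) := by
  refine ⟨⟨rfl, fun k => rfl⟩, ?_, ?_⟩
  · intro x y _ _
    simp [pvDest]
  · have : (pvAllPos n).countP (pvDest g0 []) = 0 :=
      List.countP_eq_zero.mpr (fun a _ => by simp [pvDest])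
    simp [this]

theorem pv_inv_init_B (g0 : List (List String)) (n : Int) :
    pvInv g0 n (pvDestB g0 n []) (g0, 0) := by
  refine ⟨⟨rfl, fun k => rfl⟩, ?_, ?_⟩
  · intro x y _ _
    simp [pvDestB]
  · have : (pvAllPos n).countP (pvDestB g0 n []) = 0 :=
      List.countP_eq_zero.mpr (fun a _ => by simp [pvDestB])
    simp [this]

theorem pv_A_count (grid : List (List String)) (n : Int)
    (hpre : Pre_count_destroyed_enemies grid n) :
    count_destroyed_enemies grid n =
      ((pvAllPos n).countP (pvDest grid (pvAllPos n)) : Int) := by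
  rw [pv_A_flat]
  have h := pv_outer_loop_A grid n hpre (pvAllPos n) [] (grid, 0)
    (fun p hp => ⟨(pv_mem_allPos.mp hp).1, (pv_mem_allPos.mp hp).2.2.1⟩)
    (pv_inv_init_A grid n)
  rw [List.nil_append] at h
  exact h.2.2

theorem pv_B_count (grid : List (List String)) (n : Int)
    (hpre : Pre_count_destroyed_enemies grid n) :
    count_destroyed_enemies_alt grid n =
      ((pvAllPos n).countP (pvDest grid (pvAllPos n)) : Int) := by
  rw [pv_B_flat]
  have h := pv_outer_loop_B grid n hpre (pvAllPos n) [] (grid, 0)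
    (List.nil_append _) (pv_inv_init_B grid n)
  rw [List.nil_append] at h
  rw [h.2.2]
  congr 1
  apply List.countP_congr
  intro p hp
  simp [pvDestB, hp]

-- ===== VERDICT (by name: the statement is the Claim_ definition above) =====
theorem count_destroyed_enemies_spec : Claim_equal_count_destroyed_enemies := by
  intro grid n _hdom hpre
  unfold Spec_count_destroyed_enemies
  rw [pv_A_count grid n hpre, pv_B_count grid n hpre]
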